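-- pv_equiv track=rewrite | github.com/proycon/clam | clam/common/data.py | escapeshelloperators
-- ===== SOURCE A (Python) =====
-- def escapeshelloperators(s):
--     inquote = False
--     indblquote = False
--     o = ""
--     for c in s:
--         if c == "'" and not indblquote:
--             inquote = not inquote
--             o += c
--         elif c == '"' and not inquote:
--             indblquote = not indblquote
--             o += c
--         elif not inquote and not indblquote:
--             if c == '|':
--                 o += '%PIPE%'
--             elif c == '>':
--                 o +=  '%OUT%'
--             elif c == '<':
--                 o += '%IN%'
--             elif c == '&':
--                 o += '%AMP%'
--             elif c == '!':
--                 o += '%EXCL%'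
--             else:
--                 o += c
--         else:
--             o += c
--     return o
-- ===== SOURCE B (Python) =====
-- def escapeshelloperators(s):
--     # Span-jumping rewrite: skip whole quoted spans via str.find instead of a
--     # per-character state machine with toggling flags.
--     repl = {'|': '%PIPE%', '>': '%OUT%', '<': '%IN%', '&': '%AMP%', '!': '%EXCL%'}
--     out = []
--     i = 0
--     n = len(s)
--     while i < n:
--         c = s[i]
--         if c == "'" or c == '"':
--             j = s.find(c, i + 1)
--             if j == -1:
--                 out.append(s[i:])
--                 i = n
--             else:
--                 out.append(s[i:j + 1])
--                 i = j + 1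
--         else:
--             out.append(repl.get(c, c))
--             i += 1
--     return ''.join(out)
-- ===== Notes on version B (the rewrite author's own statement) =====
-- stated objective: alternative
-- what changed: Replaced A's per-character state machine with two toggling quote flags by a span-jumping scan that consumes each quoted span in one step via str.find/slicing and maps operator chars through a dict, joining collected pieces at the end.
import Mathlib
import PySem

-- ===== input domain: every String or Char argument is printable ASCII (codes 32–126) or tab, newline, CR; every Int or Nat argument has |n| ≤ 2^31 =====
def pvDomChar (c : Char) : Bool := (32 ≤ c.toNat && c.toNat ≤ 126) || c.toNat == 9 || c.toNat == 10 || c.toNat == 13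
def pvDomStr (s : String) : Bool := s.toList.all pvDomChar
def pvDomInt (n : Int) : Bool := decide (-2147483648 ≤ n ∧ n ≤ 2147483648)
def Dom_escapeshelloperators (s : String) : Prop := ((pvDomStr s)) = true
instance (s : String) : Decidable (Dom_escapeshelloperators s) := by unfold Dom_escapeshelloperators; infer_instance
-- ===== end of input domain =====

-- B replaces A's per-character two-flag state machine by a span-jumping scan that
-- consumes each quoted span in one step (objective: alternative decomposition).

-- ===== PORT A =====
-- one step of A's loop: state = (inquote, indblquote, accumulated output chars)
def eAStep (st : Bool × Bool × List Char) (c : Char) : Bool × Bool × List Char :=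
  let (inq, indq, o) := st
  if c = '\'' ∧ indq = false then (!inq, indq, o ++ [c])
  else if c = '"' ∧ inq = false then (inq, !indq, o ++ [c])
  else if inq = false ∧ indq = false then
    if c = '|' then (inq, indq, o ++ "%PIPE%".toList)
    else if c = '>' then (inq, indq, o ++ "%OUT%".toList)
    else if c = '<' then (inq, indq, o ++ "%IN%".toList)
    else if c = '&' then (inq, indq, o ++ "%AMP%".toList)
    else if c = '!' then (inq, indq, o ++ "%EXCL%".toList)
    else (inq, indq, o ++ [c])
  else (inq, indq, o ++ [c])

def escapeshelloperators (s : String) : String :=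
  String.mk (s.toList.foldl eAStep (false, false, ([] : List Char))).2.2

-- ===== PORT B =====
-- B's replacement table (Python dict repl.get c c)
def eRepl (c : Char) : List Char :=
  if c = '|' then "%PIPE%".toList
  else if c = '>' then "%OUT%".toList
  else if c = '<' then "%IN%".toList
  else if c = '&' then "%AMP%".toList
  else if c = '!' then "%EXCL%".toList
  else [c]

-- B's while loop: jump over a whole quoted span at once (s.find → takeWhile/dropWhile)
def eBGo : List Char → List Char
  | [] => []
  | c :: rest =>
    if c = '\'' ∨ c = '"' then
      match h : rest.dropWhile (· ≠ c) with
      | [] => c :: rest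
      | _ :: tail => c :: (rest.takeWhile (· ≠ c) ++ c :: eBGo tail)
    else eRepl c ++ eBGo rest
termination_by l => l.length
decreasing_by
  · have h1 : (rest.dropWhile (· ≠ c)).length ≤ rest.length := rest.length_dropWhile_le _
    rw [h] at h1
    simp only [List.length_cons] at h1 ⊢
    omega
  · simp only [List.length_cons]; omega

def escapeshelloperators_alt (s : String) : String := String.mk (eBGo s.toList)

-- ===== PRECONDITION & SPEC =====
def Spec_escapeshelloperators (s : String) (out : String) : Prop := out = escapeshelloperators_alt s
instance (s : String) (out : String) : Decidable (Spec_escapeshelloperators s out) := by unfold Spec_escapeshelloperators; infer_instance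

-- ===== CLAIM (what is proved, stated in full; the proofs are below) =====
def Claim_equal_escapeshelloperators : Prop := ∀ (s : String), Dom_escapeshelloperators s → Spec_escapeshelloperators s (escapeshelloperators s)

-- ===== LEMMAS AND PROOFS =====

lemma eAStep_quoted (q : Char) (hq : q = '\'' ∨ q = '"') :
    ∀ (l : List Char) (o : List Char),
      ((l.foldl eAStep (if q = '\'' then (true, false, o) else (false, true, o))).2.2)
      = (match l.dropWhile (· ≠ q) with
         | [] => o ++ l
         | _ :: tail =>
             ((tail.foldl eAStep (false, false, o ++ l.takeWhile (· ≠ q) ++ [q])).2.2)) := by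
  intro l
  induction l with
  | nil => intro o; rcases hq with rfl | rfl <;> simp
  | cons d l' ih =>
    intro o
    by_cases hd : d = q
    · subst hd
      rcases hq with rfl | rfl <;>
        simp [eAStep, List.dropWhile, List.takeWhile]
    · rcases hq with rfl | rfl
      · simp only [reduceIte] at ih
        have hstep : eAStep (true, false, o) d = (true, false, o ++ [d]) := by
          simp [eAStep, hd]
        simp only [reduceIte, List.foldl_cons, hstep]
        rw [ih (o ++ [d])]
        simp only [ne_eq, decide_not] at ih ⊢
        cases hdw : List.dropWhile (fun x => !decide (x = '\'')) l' <;>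
          simp [hd, hdw]
      · simp only [Char.reduceEq, reduceIte] at ih
        have hstep : eAStep (false, true, o) d = (false, true, o ++ [d]) := by
          simp [eAStep, hd]
        simp only [List.foldl_cons, if_neg (show ¬('"' : Char) = '\'' by decide), hstep]
        rw [ih (o ++ [d])]
        simp only [ne_eq, decide_not] at ih ⊢
        cases hdw : List.dropWhile (fun x => !decide (x = '"')) l' <;>
          simp [hd, hdw]


lemma eBGo_cons_quote (c : Char) (hc : c = '\'' ∨ c = '"') (rest : List Char) :
    eBGo (c :: rest)
    = (match rest.dropWhile (· ≠ c) with
       | [] => c :: rest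
       | _ :: tail => c :: (rest.takeWhile (· ≠ c) ++ c :: eBGo tail)) := by
  rw [eBGo]
  rw [if_pos hc]
  cases hdw : rest.dropWhile (· ≠ c) <;> simp only [hdw]

lemma eBGo_cons_op (c : Char) (hc : ¬(c = '\'' ∨ c = '"')) (rest : List Char) :
    eBGo (c :: rest) = eRepl c ++ eBGo rest := by
  rw [eBGo]
  rw [if_neg hc]

lemma eA_neutral_n : ∀ (n : Nat) (l : List Char), l.length ≤ n → ∀ (o : List Char),
    ((l.foldl eAStep (false, false, o)).2.2) = o ++ eBGo l := by
  intro n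
  induction n with
  | zero =>
    intro l hl o
    have : l = [] := List.eq_nil_of_length_eq_zero (Nat.le_zero.mp hl)
    subst this; simp [eBGo]
  | succ n ih =>
    intro l hl o
    cases l with
    | nil => simp [eBGo]
    | cons c rest =>
      by_cases hq : c = '\'' ∨ c = '"'
      · rw [eBGo_cons_quote c hq rest]
        have hlen : rest.length ≤ n := by
          simp only [List.length_cons] at hl; omega
        rcases hq with rfl | rfl
        · have hstep : eAStep (false, false, o) '\'' = (true, false, o ++ ['\'']) := by
            simp [eAStep]
          have hquo := eAStep_quoted '\'' (Or.inl rfl) rest (o ++ ['\''])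
          simp only [reduceIte] at hquo
          simp only [List.foldl_cons, hstep, hquo]
          simp only [ne_eq, decide_not]
          cases hdw : rest.dropWhile (fun x => !decide (x = '\'')) with
          | nil => simp
          | cons hdd tail =>
            have htl : tail.length ≤ n := by
              have h1 : (rest.dropWhile (fun x => !decide (x = '\''))).length ≤ rest.length :=
                rest.length_dropWhile_le _
              rw [hdw] at h1; simp only [List.length_cons] at h1; omega
            simp [ih tail htl]
        · have hstep : eAStep (false, false, o) '"' = (false, true, o ++ ['"']) := by
            simp [eAStep]
          have hquo := eAStep_quoted '"' (Or.inr rfl) rest (o ++ ['"'])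
          simp only [Char.reduceEq, reduceIte] at hquo
          simp only [List.foldl_cons, hstep, hquo]
          simp only [ne_eq, decide_not]
          cases hdw : rest.dropWhile (fun x => !decide (x = '"')) with
          | nil => simp
          | cons hdd tail =>
            have htl : tail.length ≤ n := by
              have h1 : (rest.dropWhile (fun x => !decide (x = '"'))).length ≤ rest.length :=
                rest.length_dropWhile_le _
              rw [hdw] at h1; simp only [List.length_cons] at h1; omega
            simp [ih tail htl]
      · rw [eBGo_cons_op c hq rest]
        obtain ⟨h1, h2⟩ := not_or.mp hq
        have hstep : eAStep (false, false, o) c = (false, false, o ++ eRepl c) := by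
          by_cases b1 : c = '|' <;> by_cases b2 : c = '>' <;> by_cases b3 : c = '<' <;>
            by_cases b4 : c = '&' <;> by_cases b5 : c = '!' <;>
            simp_all [eAStep, eRepl]
        have hlen : rest.length ≤ n := by
          simp only [List.length_cons] at hl; omega
        simp only [List.foldl_cons, hstep, ih rest hlen]
        simp

lemma eA_neutral (l : List Char) (o : List Char) :
    ((l.foldl eAStep (false, false, o)).2.2) = o ++ eBGo l :=
  eA_neutral_n l.length l (Nat.le_refl _) o


-- ===== VERDICT (by name: the statement is the Claim_ definition above) =====
theorem escapeshelloperators_spec : Claim_equal_escapeshelloperators := by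
  intro s _
  unfold Spec_escapeshelloperators escapeshelloperators escapeshelloperators_alt
  rw [eA_neutral, List.nil_append]
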